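-- pv_equiv track=rewrite | github.com/Chris-j-hill/one_instruction_cpu | compiler.py | isolate_instructions
-- ===== SOURCE A (Python) =====
-- def isolate_instructions(file_content):
--
--     rows = len(file_content)
--     raw_instructions = file_content
--     to_remove = []
--     for i in range(0, rows-1):
--         if not file_content[i]:
--             to_remove.append(i);
--
--     for j in range(0, len(to_remove)):
--         raw_instructions.pop(to_remove[j]-j)
--
--     return raw_instructions
-- ===== SOURCE B (Python) =====
-- def isolate_instructions(file_content):
--     # Single pass: keep every non-empty line, and the last line unconditionally.
--     # (A mutates its argument in place; B does not -- equivalence is about the return value.)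
--     if not file_content:
--         return file_content
--     *init, last = file_content
--     return [line for line in init if line] + [last]
-- ===== Notes on version B (the rewrite author's own statement) =====
-- stated objective: simpler
-- what changed: A collects indices of empty lines then deletes them one by one with list.pop and offset arithmetic; B is a single-pass filter over all but the last element, appending the last element unconditionally.
import Mathlib
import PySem

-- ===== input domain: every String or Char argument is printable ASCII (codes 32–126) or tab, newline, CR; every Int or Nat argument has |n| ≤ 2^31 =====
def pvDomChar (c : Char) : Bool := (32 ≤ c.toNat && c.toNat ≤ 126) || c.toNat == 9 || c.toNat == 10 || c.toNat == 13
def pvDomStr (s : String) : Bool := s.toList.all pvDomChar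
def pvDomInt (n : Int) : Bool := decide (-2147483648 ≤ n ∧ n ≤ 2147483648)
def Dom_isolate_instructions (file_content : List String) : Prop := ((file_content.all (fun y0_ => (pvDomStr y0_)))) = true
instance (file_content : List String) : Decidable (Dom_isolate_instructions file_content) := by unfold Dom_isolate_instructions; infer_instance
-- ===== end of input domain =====

-- B replaces A's collect-indices-then-pop-each scheme by a single-pass filter that keeps
-- every non-empty line plus the last line unconditionally (simpler, one pass, no index math).
-- A mutates its argument in place; the equivalence proved here is about the return value.

-- ===== PORT A =====
-- first loop: to_remove = indices i in range(0, rows-1) with file_content[i] empty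
def pvToRemove (file_content : List String) : List Int :=
  (PySem.List.pyRange 0 ((file_content.length : Int) - 1) 1).foldl
    (fun to_remove i =>
      if PySem.List.pyGetD file_content i "" = "" then to_remove ++ [i] else to_remove) []

-- second loop: for j in range(0, len(to_remove)): raw.pop(to_remove[j]-j)
-- (the `none` branch is Python's IndexError; unreachable for the indices produced above)
def pvPopLoop (raw : List String) (ts : List Int) (j : Int) : List String :=
  match ts with
  | [] => raw
  | t :: rest =>
      match PySem.List.pop? raw (t - j) with
      | some r => pvPopLoop r.2 rest (j + 1)
      | none => raw

def isolate_instructions (file_content : List String) : List String :=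
  pvPopLoop file_content (pvToRemove file_content) 0

-- ===== PORT B =====
def isolate_instructions_alt (file_content : List String) : List String :=
  match file_content with
  | [] => []
  | _ => (file_content.dropLast.filter (fun line => !(line == ""))) ++ [file_content.getLast!]

-- ===== PRECONDITION & SPEC =====
def Spec_isolate_instructions (file_content : List String) (out : List String) : Prop := out = isolate_instructions_alt file_content
instance (file_content : List String) (out : List String) : Decidable (Spec_isolate_instructions file_content out) := by unfold Spec_isolate_instructions; infer_instance

-- ===== CLAIM (what is proved, stated in full; the proofs are below) =====
def Claim_equal_isolate_instructions : Prop := ∀ (file_content : List String), Dom_isolate_instructions file_content → Spec_isolate_instructions file_content (isolate_instructions file_content)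

-- ===== LEMMAS AND PROOFS =====

-- common recursive characterisation: drop empty lines except the last element
def pvKeep : List String → List String
  | [] => []
  | [x] => [x]
  | x :: y :: xs => if x = "" then pvKeep (y :: xs) else x :: pvKeep (y :: xs)

theorem pvAlt_eq_pvKeep (fc : List String) : isolate_instructions_alt fc = pvKeep fc := by
  induction fc with
  | nil => rfl
  | cons x xs ih =>
    cases xs with
    | nil => rfl
    | cons y ys =>
      have hlast : (x :: y :: ys).getLast! = (y :: ys).getLast! := by simp [List.getLast!]
      have hgd : (y :: ys).getLast! = (y :: ys).getLast?.getD "" := by simp [List.getLast!, List.getLast?_eq_some_getLast]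
      simp only [isolate_instructions_alt, pvKeep] at ih ⊢
      rw [List.dropLast_cons_of_ne_nil (by simp), List.filter_cons, hlast]
      rw [hgd] at ih
      by_cases hx : x = "" <;> simp [hx, ih]

theorem pvGetD_cons_succ (x : String) (xs : List String) (i : Int) (h : 0 ≤ i) :
    PySem.List.pyGetD (x :: xs) (i + 1) "" = PySem.List.pyGetD xs i "" := by
  obtain ⟨k, rfl⟩ : ∃ k : ℕ, i = (k : Int) := ⟨i.toNat, (Int.toNat_of_nonneg h).symm⟩
  rw [show ((k : Int) + 1) = ((k + 1 : ℕ) : Int) by push_cast; ring,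
      PySem.List.pyGetD_natCast, PySem.List.pyGetD_natCast, List.getD_cons_succ]

theorem pvToRemove_eq_filter (fc : List String) :
    pvToRemove fc = (PySem.List.pyRange 0 ((fc.length : Int) - 1) 1).filter
      (fun i => decide (PySem.List.pyGetD fc i "" = "")) := by
  unfold pvToRemove
  rw [PySem.List.foldl_append_ite_eq_filter (fun i => PySem.List.pyGetD fc i "" = "")]
  simp

theorem pvToRemove_pairwise (fc : List String) : (pvToRemove fc).Pairwise (· < ·) := by
  rw [pvToRemove_eq_filter]
  exact (PySem.List.pairwise_lt_pyRange_one _ _).filter _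

theorem pvToRemove_nonneg (fc : List String) : ∀ t ∈ pvToRemove fc, 0 ≤ t := by
  intro t ht
  rw [pvToRemove_eq_filter] at ht
  exact (PySem.List.mem_pyRange_one.mp (List.mem_of_mem_filter ht)).1

-- decompose to_remove at the head of the list (xs nonempty)
theorem pvToRemove_cons (x : String) (xs : List String) (h : xs ≠ []) :
    pvToRemove (x :: xs) =
      (if x = "" then [(0 : Int)] else []) ++ (pvToRemove xs).map (· + 1) := by
  rw [pvToRemove_eq_filter, pvToRemove_eq_filter]
  have hlen : ((x :: xs).length : Int) - 1 = (xs.length : Int) := by simp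
  rw [hlen]
  have hpos : (0 : Int) < (xs.length : Int) := by
    have := List.length_pos_iff.mpr h; exact_mod_cast this
  rw [PySem.List.pyRange_one_cons hpos]
  rw [List.filter_cons]
  have h0 : PySem.List.pyGetD (x :: xs) 0 "" = x := by
    have := PySem.List.pyGetD_natCast (x :: xs) 0 ""
    simpa using this
  have hshift : PySem.List.pyRange (0 + 1) (xs.length : Int) 1
      = (PySem.List.pyRange 0 ((xs.length : Int) - 1) 1).map (· + 1) := by
    rw [PySem.List.pyRange_one, PySem.List.pyRange_one, List.map_map]
    simp only [sub_zero, zero_add, Function.comp_def]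
    refine List.map_congr_left (fun k _ => by ring)
  rw [hshift, List.filter_map]
  have hcong : List.filter ((fun i => decide (PySem.List.pyGetD (x :: xs) i "" = "")) ∘ (· + 1))
        (PySem.List.pyRange 0 ((xs.length : Int) - 1) 1)
      = List.filter (fun i => decide (PySem.List.pyGetD xs i "" = ""))
        (PySem.List.pyRange 0 ((xs.length : Int) - 1) 1) := by
    refine List.filter_congr (fun i hi => ?_)
    have h0i : 0 ≤ i := (PySem.List.mem_pyRange_one.mp hi).1
    simp only [Function.comp_def]
    rw [pvGetD_cons_succ x xs i h0i]
  rw [hcong, h0]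
  by_cases hx : x = "" <;> simp [hx]

theorem pvSH1 (ts : List Int) : ∀ (l : List String) (j : Int),
    pvPopLoop l (ts.map (· + 1)) (j + 1) = pvPopLoop l ts j := by
  induction ts with
  | nil => intro l j; rfl
  | cons t rest ih =>
    intro l j
    simp only [List.map_cons, pvPopLoop]
    have : t + 1 - (j + 1) = t - j := by ring
    rw [this]
    cases PySem.List.pop? l (t - j) with
    | none => rfl
    | some r => exact ih r.2 (j + 1)

theorem pvPop_cons_pos (x : String) (l : List String) (i : Int) (h : 1 ≤ i) :
    PySem.List.pop? (x :: l) i = (PySem.List.pop? l (i - 1)).map (fun r => (r.1, x :: r.2)) := by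
  obtain ⟨k, rfl⟩ : ∃ k : ℕ, i = (k : Int) + 1 := ⟨(i - 1).toNat, by omega⟩
  by_cases hk : k < l.length
  · rw [show ((k : Int) + 1) = ((k + 1 : ℕ) : Int) by push_cast; ring,
        PySem.List.pop?_natCast (x :: l) (k + 1) (by simp; omega),
        show (((k + 1 : ℕ) : Int) - 1) = ((k : ℕ) : Int) by push_cast; ring,
        PySem.List.pop?_natCast l k hk]
    simp
  · simp [PySem.List.pop?, PySem.List.pyIdx?, hk]
    omega

theorem pvSH2 (ts : List Int) : ∀ (x : String) (l : List String) (j : Int),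
    ts.Pairwise (· < ·) → (∀ t ∈ ts, j ≤ t) →
    pvPopLoop (x :: l) (ts.map (· + 1)) j = x :: pvPopLoop l ts j := by
  induction ts with
  | nil => intro x l j _ _; rfl
  | cons t rest ih =>
    intro x l j hpw hge
    simp only [List.map_cons, pvPopLoop]
    have h1 : (1 : Int) ≤ t + 1 - j := by
      have := hge t (List.mem_cons_self ..); omega
    rw [pvPop_cons_pos x l _ h1]
    have : t + 1 - j - 1 = t - j := by ring
    rw [this]
    cases hp : PySem.List.pop? l (t - j) with
    | none => rfl
    | some r =>
      simp only [Option.map_some]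
      exact ih x r.2 (j + 1) hpw.of_cons
        (fun u hu => by have := (List.pairwise_cons.mp hpw).1 u hu; omega)

theorem pvA_eq_pvKeep (fc : List String) : isolate_instructions fc = pvKeep fc := by
  induction fc with
  | nil => rfl
  | cons x xs ih =>
    cases xs with
    | nil => rfl
    | cons y ys =>
      unfold isolate_instructions at ih ⊢
      rw [pvToRemove_cons x (y :: ys) (by simp)]
      by_cases hx : x = ""
      · subst hx
        rw [if_pos rfl]
        simp only [List.cons_append, List.nil_append]
        rw [show pvPopLoop ("" :: y :: ys) (0 :: (pvToRemove (y :: ys)).map (· + 1)) 0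
              = pvPopLoop (y :: ys) ((pvToRemove (y :: ys)).map (· + 1)) (0 + 1) by
            simp [pvPopLoop, PySem.List.pop?_zero_cons]]
        rw [pvSH1 (pvToRemove (y :: ys)) (y :: ys) 0]
        rw [ih, pvKeep, if_pos rfl]
      · rw [if_neg hx]
        simp only [List.nil_append]
        rw [pvSH2 _ x (y :: ys) 0 (pvToRemove_pairwise _) (pvToRemove_nonneg _)]
        rw [ih, pvKeep, if_neg hx]

-- ===== VERDICT (by name: the statement is the Claim_ definition above) =====
theorem isolate_instructions_spec : Claim_equal_isolate_instructions := by
  intro fc _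
  unfold Spec_isolate_instructions
  rw [pvA_eq_pvKeep, pvAlt_eq_pvKeep]
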